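-- pv_equiv track=rewrite | github.com/fanfancy/hetero_gem5 | nnparser_SE_hetero/mesh_hetero.py | append_ring_route
-- ===== SOURCE A (Python) =====
-- def append_ring_route(route, sub_Ring, src, dst):
--     if sub_Ring.index(dst) > sub_Ring.index(src):
--         for i in range(sub_Ring.index(src), sub_Ring.index(dst)):
--             route.append((sub_Ring[i], sub_Ring[i + 1]))
--         return route
--     else:
--         for i in range(sub_Ring.index(src), len(sub_Ring) - 1):
--             route.append((sub_Ring[i], sub_Ring[i + 1]))
--
--         route.append((sub_Ring[len(sub_Ring) - 1], sub_Ring[0]))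
--
--         for i in range(sub_Ring.index(dst)):
--             route.append((sub_Ring[i], sub_Ring[i + 1]))
--         return route
-- ===== SOURCE B (Python) =====
-- def append_ring_route(route, sub_Ring, src, dst):
--     i = sub_Ring.index(src)
--     j = sub_Ring.index(dst)
--     n = len(sub_Ring)
--     count = (j - i - 1) % n + 1
--     for step in range(count):
--         k = (i + step) % n
--         route.append((sub_Ring[k], sub_Ring[(k + 1) % n]))
--     return route
-- ===== Notes on version B (the rewrite author's own statement) =====
-- stated objective: simpler
-- what changed: Replaces A's two asymmetric branches (forward segment vs. tail+wrap-edge+head segment) with a single loop over modular indices: count = ((j-i-1) % n) + 1 edges, each (ring[k], ring[(k+1)%n]) for k walking from i modulo n.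
import Mathlib
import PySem

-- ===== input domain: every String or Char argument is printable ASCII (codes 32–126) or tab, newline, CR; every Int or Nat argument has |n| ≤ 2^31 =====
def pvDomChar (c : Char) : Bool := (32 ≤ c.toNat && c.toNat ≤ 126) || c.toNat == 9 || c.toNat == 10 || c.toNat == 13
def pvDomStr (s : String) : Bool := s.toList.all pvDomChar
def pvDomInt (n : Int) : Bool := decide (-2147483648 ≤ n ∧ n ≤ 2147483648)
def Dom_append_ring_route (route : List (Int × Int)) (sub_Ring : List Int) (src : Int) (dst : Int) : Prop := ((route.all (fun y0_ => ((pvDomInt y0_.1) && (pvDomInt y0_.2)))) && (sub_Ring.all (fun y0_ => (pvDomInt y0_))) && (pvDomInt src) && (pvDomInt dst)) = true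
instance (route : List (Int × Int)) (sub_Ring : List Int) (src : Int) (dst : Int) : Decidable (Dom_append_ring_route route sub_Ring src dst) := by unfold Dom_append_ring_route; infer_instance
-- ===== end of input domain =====

-- B replaces A's two asymmetric branches by one modular-index loop (objective: simpler).
-- Both Pythons mutate `route` in place identically; the equivalence proved here is about the return value.

-- ===== PORT A =====
-- literal port of A: two branches, ranges over absolute indices, wrap edge appended by hand
def append_ring_route (route : List (Int × Int)) (sub_Ring : List Int) (src : Int) (dst : Int) : List (Int × Int) :=
  match PySem.List.index? sub_Ring dst, PySem.List.index? sub_Ring src with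
  | some j, some i =>
    if (j : Int) > (i : Int) then
      (PySem.List.pyRange (i : Int) (j : Int) 1).foldl
        (fun r k => r ++ [(PySem.List.pyGetD sub_Ring k 0, PySem.List.pyGetD sub_Ring (k + 1) 0)]) route
    else
      let r1 := (PySem.List.pyRange (i : Int) ((sub_Ring.length : Int) - 1) 1).foldl
        (fun r k => r ++ [(PySem.List.pyGetD sub_Ring k 0, PySem.List.pyGetD sub_Ring (k + 1) 0)]) route
      let r2 := r1 ++ [(PySem.List.pyGetD sub_Ring ((sub_Ring.length : Int) - 1) 0, PySem.List.pyGetD sub_Ring 0 0)]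
      (PySem.List.pyRange 0 (j : Int) 1).foldl
        (fun r k => r ++ [(PySem.List.pyGetD sub_Ring k 0, PySem.List.pyGetD sub_Ring (k + 1) 0)]) r2
  | _, _ => route   -- Python raises ValueError here; excluded by Pre_

-- ===== PORT B =====
-- literal port of Source B: count = ((j-i-1) % n) + 1 edges, k = (i+step) % n
def append_ring_route_alt (route : List (Int × Int)) (sub_Ring : List Int) (src : Int) (dst : Int) : List (Int × Int) :=
  match PySem.List.index? sub_Ring src with
  | none => route   -- Python raises ValueError here; excluded by Pre_
  | some i =>
    match PySem.List.index? sub_Ring dst with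
    | none => route   -- Python raises ValueError here; excluded by Pre_
    | some j =>
      let n : Int := sub_Ring.length
      let count := PySem.Int.mod ((j : Int) - (i : Int) - 1) n + 1
      (PySem.List.pyRange 0 count 1).foldl
        (fun r step =>
          let k := PySem.Int.mod ((i : Int) + step) n
          r ++ [(PySem.List.pyGetD sub_Ring k 0, PySem.List.pyGetD sub_Ring (PySem.Int.mod (k + 1) n) 0)]) route

-- ===== PRECONDITION & SPEC =====
-- Pre_ excludes exactly the inputs where Python's sub_Ring.index raises ValueError (src or dst not in sub_Ring).
def Pre_append_ring_route (route : List (Int × Int)) (sub_Ring : List Int) (src : Int) (dst : Int) : Prop :=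
  src ∈ sub_Ring ∧ dst ∈ sub_Ring
instance (route : List (Int × Int)) (sub_Ring : List Int) (src : Int) (dst : Int) : Decidable (Pre_append_ring_route route sub_Ring src dst) := by unfold Pre_append_ring_route; infer_instance

def pvWitness_append_ring_route : (List (Int × Int)) × List Int × Int × Int := ([(9, 9)], [1, 2, 3, 4], 3, 2)

def Spec_append_ring_route (route : List (Int × Int)) (sub_Ring : List Int) (src : Int) (dst : Int) (out : List (Int × Int)) : Prop := out = append_ring_route_alt route sub_Ring src dst
instance (route : List (Int × Int)) (sub_Ring : List Int) (src : Int) (dst : Int) (out : List (Int × Int)) : Decidable (Spec_append_ring_route route sub_Ring src dst out) := by unfold Spec_append_ring_route; infer_instance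

-- ===== CLAIM (what is proved, stated in full; the proofs are below) =====
def Claim_equal_append_ring_route : Prop := ∀ (route : List (Int × Int)) (sub_Ring : List Int) (src : Int) (dst : Int), Dom_append_ring_route route sub_Ring src dst → Pre_append_ring_route route sub_Ring src dst → Spec_append_ring_route route sub_Ring src dst (append_ring_route route sub_Ring src dst)

-- ===== LEMMAS AND PROOFS =====

-- one congruence lemma for maps over shifted ranges (specific glue for the two ports)
theorem pvMapRangeShift {α : Type} (f g : Int → α) (a b c d : Int)
    (hlen : b - a = d - c)
    (h : ∀ t : Int, 0 ≤ t → t < b - a → f (a + t) = g (c + t)) :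
    (PySem.List.pyRange a b 1).map f = (PySem.List.pyRange c d 1).map g := by
  rw [PySem.List.pyRange_one a b, PySem.List.pyRange_one c d, List.map_map, List.map_map]
  have hbd : (b - a).toNat = (d - c).toNat := by omega
  rw [← hbd]
  apply List.map_congr_left
  intro k hk
  have hk' : (k : Int) < b - a := by
    have := List.mem_range.mp hk; omega
  exact h k (by omega) hk'

theorem append_ring_route_spec : Claim_equal_append_ring_route := by
  intro route sub_Ring src dst _ hpre
  obtain ⟨hs, hd⟩ := hpre
  obtain ⟨i, hi⟩ := Option.isSome_iff_exists.mp ((PySem.List.index?_isSome_iff sub_Ring src).mpr hs)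
  obtain ⟨j, hj⟩ := Option.isSome_iff_exists.mp ((PySem.List.index?_isSome_iff sub_Ring dst).mpr hd)
  obtain ⟨hilt, -, -⟩ := PySem.List.getElem_of_index?_eq_some hi
  obtain ⟨hjlt, -, -⟩ := PySem.List.getElem_of_index?_eq_some hj
  have hn : (0 : Int) < (sub_Ring.length : Int) := by
    have : 0 < sub_Ring.length := Nat.lt_of_le_of_lt (Nat.zero_le _) hilt
    exact_mod_cast this
  have hiI : (i : Int) < (sub_Ring.length : Int) := by exact_mod_cast hilt
  have hjI : (j : Int) < (sub_Ring.length : Int) := by exact_mod_cast hjlt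
  set n : Int := (sub_Ring.length : Int) with hnn
  unfold Spec_append_ring_route append_ring_route append_ring_route_alt
  rw [hi, hj]
  simp only [PySem.Int.mod_eq_emod_of_pos hn, PySem.List.foldl_append_singleton_eq_map,
    List.append_assoc, ← hnn]
  by_cases hij : (i : Int) < (j : Int)
  · -- forward branch
    rw [if_pos (by exact_mod_cast hij)]
    have hcount : ((j : Int) - (i : Int) - 1) % n + 1 = (j : Int) - (i : Int) := by
      rw [Int.emod_eq_of_lt (by omega) (by omega)]; ring
    rw [hcount]
    congr 1
    apply pvMapRangeShift _ _ _ _ _ _ (by ring)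
    intro t ht0 ht1
    rw [show (i : Int) + (0 + t) = (i : Int) + t from by ring,
        Int.emod_eq_of_lt (by omega) (by omega),
        Int.emod_eq_of_lt (by omega) (by omega)]
  · -- wrap-around branch
    rw [if_neg (by omega)]
    have hcount : ((j : Int) - (i : Int) - 1) % n + 1 = n + ((j : Int) - (i : Int)) := by
      rw [Int.emod_eq_add_self_emod, Int.emod_eq_of_lt (by omega) (by omega)]; ring
    rw [hcount]
    rw [PySem.List.pyRange_one_append 0 (n - 1 - (i : Int)) (n + ((j : Int) - (i : Int)))
          (by omega) (by omega),
        PySem.List.pyRange_one_append (n - 1 - (i : Int)) (n - (i : Int)) (n + ((j : Int) - (i : Int)))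
          (by omega) (by omega),
        show n - (i : Int) = (n - 1 - (i : Int)) + 1 from by ring,
        PySem.List.pyRange_one_singleton,
        List.map_append, List.map_append, List.map_singleton]
    congr 1
    congr 1
    · -- first chunk: edges i .. n-2
      apply pvMapRangeShift _ _ _ _ _ _ (by ring)
      intro t ht0 ht1
      rw [show (i : Int) + (0 + t) = (i : Int) + t from by ring,
          Int.emod_eq_of_lt (by omega) (by omega),
          Int.emod_eq_of_lt (by omega) (by omega)]
    congr 1
    · -- wrap edge (ring[n-1], ring[0])
      rw [show (i : Int) + (n - 1 - (i : Int)) = n - 1 from by ring,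
          Int.emod_eq_of_lt (by omega) (by omega),
          show n - 1 + 1 = n from by ring, Int.emod_self]
    · -- last chunk: edges 0 .. j-1
      apply pvMapRangeShift _ _ _ _ _ _ (by ring)
      intro t ht0 ht1
      rw [show (i : Int) + (n - 1 - (i : Int) + 1 + t) = t + n from by ring,
          Int.add_emod_right, Int.emod_eq_of_lt (by omega) (by omega),
          Int.emod_eq_of_lt (by omega) (by omega),
          show (0 : Int) + t = t from by ring]
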